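-- pv_equiv track=rewrite | github.com/diazf/pref_eval | measures/lexicographic.py | lexirecall
-- ===== SOURCE A (Python) =====
-- def lexirecall(x: list[int],y: list[int], x_rr:int, y_rr:int) -> float:
--     if x_rr > y_rr:
--         return 1
--     elif x_rr < y_rr:
--         return -1
--     m:int = len(x)
--     for i in range(x_rr-1,-1,-1):
--         if (x[i] is None) and (y[i] is None):
--             continue
--         if (x[i] is None):
--             return -1
--         if (y[i] is None):
--             return 1
--         if (x[i] < y[i]):
--             return 1
--         if (x[i] > y[i]):
--             return -1
--     return 0
-- ===== SOURCE B (Python) =====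
-- def lexirecall(x: list[int], y: list[int], x_rr: int, y_rr: int) -> float:
--     if x_rr > y_rr:
--         return 1
--     if x_rr < y_rr:
--         return -1
--     def key(v):
--         # None is "worst": larger than any present rank
--         return (1, 0) if v is None else (0, v)
--     xk = [key(x[i]) for i in range(x_rr - 1, -1, -1)]
--     yk = [key(y[i]) for i in range(x_rr - 1, -1, -1)]
--     if xk < yk:
--         return 1
--     if xk > yk:
--         return -1
--     return 0
-- ===== Notes on version B (the rewrite author's own statement) =====
-- stated objective: alternative
-- what changed: Instead of a manual branch-and-early-return scan, B maps both prefixes to comparison keys (None -> a key larger than any rank) and delegates the decision to Python's built-in lexicographic list comparison.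
import Mathlib
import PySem

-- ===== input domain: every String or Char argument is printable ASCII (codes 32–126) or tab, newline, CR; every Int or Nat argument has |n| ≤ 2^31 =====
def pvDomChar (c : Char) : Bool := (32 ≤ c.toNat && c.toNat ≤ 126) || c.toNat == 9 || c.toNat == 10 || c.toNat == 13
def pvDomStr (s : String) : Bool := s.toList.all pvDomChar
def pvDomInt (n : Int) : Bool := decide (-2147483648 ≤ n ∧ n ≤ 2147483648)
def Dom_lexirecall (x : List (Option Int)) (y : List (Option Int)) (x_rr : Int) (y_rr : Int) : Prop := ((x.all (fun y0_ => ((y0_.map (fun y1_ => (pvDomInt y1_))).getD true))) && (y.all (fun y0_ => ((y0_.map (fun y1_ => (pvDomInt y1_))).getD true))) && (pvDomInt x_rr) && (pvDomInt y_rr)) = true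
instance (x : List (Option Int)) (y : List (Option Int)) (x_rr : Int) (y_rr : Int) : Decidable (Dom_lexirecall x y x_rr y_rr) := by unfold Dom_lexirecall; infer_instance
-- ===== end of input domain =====

-- B replaces A's manual branch-and-early-return scan by building key lists (None -> a key
-- larger than any rank) and delegating to lexicographic list comparison (objective: alternative).

-- ===== PORT A =====
-- the loop body of A, over the remaining index list of range(x_rr-1,-1,-1);
-- x[i]/y[i] ported with pyGet? (indices are in range on every input Pre_ admits)
def pvLoopA (x y : List (Option Int)) : List Int → Int
  | [] => 0
  | i :: rest =>
    match (PySem.List.pyGet? x i).getD none, (PySem.List.pyGet? y i).getD none with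
    | none, none => pvLoopA x y rest
    | none, some _ => -1
    | some _, none => 1
    | some a, some b =>
      if a < b then 1
      else if a > b then -1
      else pvLoopA x y rest

def lexirecall (x : List (Option Int)) (y : List (Option Int)) (x_rr : Int) (y_rr : Int) : Int :=
  if x_rr > y_rr then 1
  else if x_rr < y_rr then -1
  else pvLoopA x y (PySem.List.pyRange (x_rr - 1) (-1) (-1))

-- ===== PORT B =====
-- key(v): None maps above every present rank (Python tuple (1,0) vs (0,v))
def pvKey : Option Int → Int × Int
  | none => (1, 0)
  | some v => (0, v)

-- Python tuple '<' on pairs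
def pvPairLt (a b : Int × Int) : Bool :=
  if a.1 < b.1 then true
  else if b.1 < a.1 then false
  else decide (a.2 < b.2)

-- Python list '<' (lexicographic)
def pvLexLt : List (Int × Int) → List (Int × Int) → Bool
  | [], [] => false
  | [], _ :: _ => true
  | _ :: _, [] => false
  | a :: as_, b :: bs =>
    if pvPairLt a b then true
    else if pvPairLt b a then false
    else pvLexLt as_ bs

def lexirecall_alt (x : List (Option Int)) (y : List (Option Int)) (x_rr : Int) (y_rr : Int) : Int :=
  if x_rr > y_rr then 1
  else if x_rr < y_rr then -1
  else
    let idx := PySem.List.pyRange (x_rr - 1) (-1) (-1)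
    let xk := idx.map (fun i => pvKey ((PySem.List.pyGet? x i).getD none))
    let yk := idx.map (fun i => pvKey ((PySem.List.pyGet? y i).getD none))
    if pvLexLt xk yk then 1
    else if pvLexLt yk xk then -1
    else 0

-- ===== PRECONDITION & SPEC =====
-- Pre_ excludes exactly the inputs where Python A raises IndexError: the scan runs only
-- when x_rr = y_rr, and then indexes x[x_rr-1], y[x_rr-1] first, so it raises iff
-- 1 ≤ x_rr and either list is shorter than x_rr.  (B raises on the same inputs.)
def Pre_lexirecall (x : List (Option Int)) (y : List (Option Int)) (x_rr : Int) (y_rr : Int) : Prop :=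
  x_rr = y_rr → x_rr ≤ 0 ∨ (x_rr ≤ (x.length : Int) ∧ x_rr ≤ (y.length : Int))
instance (x : List (Option Int)) (y : List (Option Int)) (x_rr : Int) (y_rr : Int) : Decidable (Pre_lexirecall x y x_rr y_rr) := by unfold Pre_lexirecall; infer_instance

def pvWitness_lexirecall : List (Option Int) × List (Option Int) × Int × Int :=
  ([some 1, none], [some 2, some 1], 2, 2)

def Spec_lexirecall (x : List (Option Int)) (y : List (Option Int)) (x_rr : Int) (y_rr : Int) (out : Int) : Prop := out = lexirecall_alt x y x_rr y_rr
instance (x : List (Option Int)) (y : List (Option Int)) (x_rr : Int) (y_rr : Int) (out : Int) : Decidable (Spec_lexirecall x y x_rr y_rr out) := by unfold Spec_lexirecall; infer_instance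

-- ===== CLAIM (what is proved, stated in full; the proofs are below) =====
def Claim_equal_lexirecall : Prop := ∀ (x : List (Option Int)) (y : List (Option Int)) (x_rr : Int) (y_rr : Int), Dom_lexirecall x y x_rr y_rr → Pre_lexirecall x y x_rr y_rr → Spec_lexirecall x y x_rr y_rr (lexirecall x y x_rr y_rr)

-- ===== LEMMAS AND PROOFS =====

-- one step of the scan, against one cons step of the lexicographic comparison
lemma pvStep (xi yi : Option Int) (r : Int) (as_ bs : List (Int × Int))
    (h : r = if pvLexLt as_ bs then 1 else if pvLexLt bs as_ then -1 else 0) :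
    (match xi, yi with
      | none, none => r
      | none, some _ => (-1 : Int)
      | some _, none => 1
      | some a, some b => if a < b then 1 else if a > b then -1 else r) =
    if pvLexLt (pvKey xi :: as_) (pvKey yi :: bs) then 1
    else if pvLexLt (pvKey yi :: bs) (pvKey xi :: as_) then -1
    else 0 := by
  cases xi with
  | none =>
    cases yi with
    | none => simpa [pvKey, pvLexLt, pvPairLt] using h
    | some b => norm_num [pvKey, pvLexLt, pvPairLt]
  | some a =>
    cases yi with
    | none => norm_num [pvKey, pvLexLt, pvPairLt]
    | some b =>
      by_cases h1 : a < b
      · norm_num [pvKey, pvLexLt, pvPairLt, h1]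
      · by_cases h2 : b < a
        · norm_num [pvKey, pvLexLt, pvPairLt, h1, h2]
        · have hab : a = b := le_antisymm (not_lt.mp h2) (not_lt.mp h1)
          subst hab
          simpa [pvKey, pvLexLt, pvPairLt] using h

-- the scan equals the key-list comparison, for ANY index list
lemma pvLoopA_eq_lex (x y : List (Option Int)) (idx : List Int) :
    pvLoopA x y idx =
      (if pvLexLt (idx.map (fun i => pvKey ((PySem.List.pyGet? x i).getD none)))
                  (idx.map (fun i => pvKey ((PySem.List.pyGet? y i).getD none))) then 1
       else if pvLexLt (idx.map (fun i => pvKey ((PySem.List.pyGet? y i).getD none)))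
                       (idx.map (fun i => pvKey ((PySem.List.pyGet? x i).getD none))) then -1
       else 0) := by
  induction idx with
  | nil => simp [pvLoopA, pvLexLt]
  | cons i rest ih =>
    simp only [List.map_cons]
    rw [pvLoopA]
    exact pvStep _ _ _ _ _ ih

-- ===== VERDICT (by name: the statement is the Claim_ definition above) =====
theorem lexirecall_spec : Claim_equal_lexirecall := by
  intro x y x_rr y_rr _ _
  unfold Spec_lexirecall lexirecall lexirecall_alt
  by_cases h1 : x_rr > y_rr
  · simp [h1]
  · by_cases h2 : x_rr < y_rr
    · simp [h1, h2]
    · simp only [h1, h2, if_false]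
      exact pvLoopA_eq_lex x y _
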